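-- pv_equiv track=rewrite | github.com/CimpianAlin/framework-core | src/omnijni/src/python/omnijni/idljni.py | mangleUnderscores
-- ===== SOURCE A (Python) =====
-- def mangleUnderscores (name):
--     outname = ''
--     count = 0
--     for c in name:
--         if c == '_':
--             count += 1
--         else:
--             if count > 0:
--                 outname += '_%d' % count
--                 count = 0
--             outname += c
--     return outname
-- ===== SOURCE B (Python) =====
-- def mangleUnderscores(name):
--     # Run-based scan: measure each maximal underscore run directly and emit
--     # one '_<len>' marker per run (dropped when the run is trailing), joining
--     # the pieces at the end instead of keeping a pending counter per character.
--     parts = []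
--     i, n = 0, len(name)
--     while i < n:
--         c = name[i]
--         if c == '_':
--             j = i
--             while j < n and name[j] == '_':
--                 j += 1
--             if j < n:
--                 parts.append('_%d' % (j - i))
--             i = j
--         else:
--             parts.append(c)
--             i += 1
--     return ''.join(parts)
-- ===== Notes on version B (the rewrite author's own statement) =====
-- stated objective: alternative
-- what changed: Replaces the per-character pending-underscore counter with a run-based scan that measures each maximal underscore run in one inner step, appends pieces to a list and joins once at the end.
import Mathlib
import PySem

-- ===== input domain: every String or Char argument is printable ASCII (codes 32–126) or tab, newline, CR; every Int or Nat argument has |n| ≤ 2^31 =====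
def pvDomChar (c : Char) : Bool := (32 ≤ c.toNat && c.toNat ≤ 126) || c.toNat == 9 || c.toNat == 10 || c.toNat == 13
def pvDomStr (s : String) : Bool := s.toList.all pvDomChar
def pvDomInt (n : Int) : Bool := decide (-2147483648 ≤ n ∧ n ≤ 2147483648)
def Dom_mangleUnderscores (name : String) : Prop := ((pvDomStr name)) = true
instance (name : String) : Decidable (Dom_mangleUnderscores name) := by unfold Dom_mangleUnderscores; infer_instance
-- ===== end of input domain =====

-- B replaces A's per-character pending counter with a run-based scan (one marker per maximal underscore run, joined at the end); same behaviour.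

-- ===== PORT A =====
-- for c in name: count underscores, flush '_%d' before each non-underscore
def pvAGo : List Char → List Char → Int → List Char
  | [], outname, _ => outname
  | c :: cs, outname, count =>
    if c = '_' then pvAGo cs outname (count + 1)
    else pvAGo cs ((if count > 0 then outname ++ '_' :: PySem.Int.toChars count else outname) ++ [c]) 0

def mangleUnderscores (name : String) : String :=
  String.ofList (pvAGo name.toList [] 0)

-- ===== PORT B =====
-- run-based scan: the inner 'while name[j] == "_"' is takeWhile/dropWhile
def pvBGo (name : List Char) : List (List Char) :=
  match name with
  | [] => []
  | c :: cs =>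
    if c = '_' then
      let run := cs.takeWhile (fun x => x == '_')
      let rest := cs.dropWhile (fun x => x == '_')
      (if rest = [] then [] else [('_' :: PySem.Int.toChars ((1 : Int) + run.length))]) ++ pvBGo rest
    else [c] :: pvBGo cs
termination_by name.length
decreasing_by
  · simp only [List.length_cons]
    exact Nat.lt_succ_of_le (List.length_dropWhile_le _ _)
  · simp

def mangleUnderscores_alt (name : String) : String :=
  String.ofList (pvBGo name.toList).flatten

-- ===== PRECONDITION & SPEC =====
def Spec_mangleUnderscores (name : String) (out : String) : Prop := out = mangleUnderscores_alt name
instance (name : String) (out : String) : Decidable (Spec_mangleUnderscores name out) := by unfold Spec_mangleUnderscores; infer_instance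

-- ===== CLAIM (what is proved, stated in full; the proofs are below) =====
def Claim_equal_mangleUnderscores : Prop := ∀ (name : String), Dom_mangleUnderscores name → Spec_mangleUnderscores name (mangleUnderscores name)

-- ===== LEMMAS AND PROOFS =====

theorem pvAGo_append (cs : List Char) (out : List Char) (count : Int) :
    pvAGo cs out count = out ++ pvAGo cs [] count := by
  induction cs generalizing out count with
  | nil => simp [pvAGo]
  | cons c cs ih =>
    simp only [pvAGo, List.nil_append]
    split_ifs with h1 h2
    · rw [ih]
    · conv_rhs => rw [ih]
      rw [ih]
      simp
    · conv_rhs => rw [ih]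
      rw [ih]
      simp

theorem pvAGo_run (cs : List Char) (count : Int) (hc : 0 < count) :
    pvAGo cs [] count =
      if (cs.dropWhile (fun x => x == '_')) = [] then []
      else ('_' :: PySem.Int.toChars (count + (cs.takeWhile (fun x => x == '_')).length))
           ++ pvAGo (cs.dropWhile (fun x => x == '_')) [] 0 := by
  induction cs generalizing count with
  | nil => simp [pvAGo]
  | cons c cs ih =>
    by_cases h : c = '_'
    · simp only [pvAGo, List.takeWhile_cons, List.dropWhile_cons, h,
        beq_self_eq_true, if_pos]
      rw [ih (count + 1) (by omega)]
      simp only [List.length_cons]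
      congr 3
      push_cast
      ring
    · have hb : (c == '_') = false := by simp [h]
      have h0 : ¬ ((0 : Int) > 0) := by norm_num
      simp only [pvAGo, if_neg h, List.takeWhile_cons, List.dropWhile_cons, hb,
        if_pos hc, Bool.false_eq_true, if_false, List.nil_append, List.length_nil,
        Nat.cast_zero, add_zero, List.cons_ne_nil, if_neg h0]
      rw [pvAGo_append cs ('_' :: PySem.Int.toChars count ++ [c]) 0,
          pvAGo_append cs [c] 0]
      simp

theorem pvAGo_eq_pvBGo : ∀ n (cs : List Char), cs.length ≤ n →
    pvAGo cs [] 0 = (pvBGo cs).flatten := by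
  intro n
  induction n with
  | zero =>
    intro cs h
    have : cs = [] := List.eq_nil_of_length_eq_zero (Nat.le_zero.mp h)
    subst this; simp [pvAGo, pvBGo]
  | succ n ih =>
    intro cs h
    match cs with
    | [] => simp [pvAGo, pvBGo]
    | c :: cs =>
      by_cases hc : c = '_'
      · simp only [pvAGo, if_pos hc, pvBGo, zero_add]
        rw [pvAGo_run cs 1 (by norm_num)]
        have hlen : (cs.dropWhile (fun x => x == '_')).length ≤ n := by
          have := List.length_dropWhile_le (fun x => x == '_') cs
          simp only [List.length_cons] at h
          omega
        by_cases hrest : (cs.dropWhile (fun x => x == '_')) = []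
        · simp [hrest, pvBGo]
        · rw [if_neg hrest, if_neg hrest, ih _ hlen]
          simp
      · simp only [pvAGo, pvBGo, if_neg hc]
        rw [pvAGo_append]
        simp only [List.length_cons] at h
        rw [ih cs (by omega)]
        simp

-- ===== VERDICT (by name: the statement is the Claim_ definition above) =====
theorem mangleUnderscores_spec : Claim_equal_mangleUnderscores := by
  intro name _
  show mangleUnderscores name = mangleUnderscores_alt name
  unfold mangleUnderscores mangleUnderscores_alt
  rw [pvAGo_eq_pvBGo name.toList.length name.toList le_rfl]
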